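-- pv_equiv track=rewrite | github.com/metonline/mgbric | generate_dd_analysis.py | parse_hand_string
-- ===== SOURCE A (Python) =====
-- def parse_hand_string(hand_str):
--     """SUI:RK format hand stringini parse et"""
--     suits = {'S': [], 'H': [], 'D': [], 'C': []}
--     current_suit = None
--
--     i = 0
--     while i < len(hand_str):
--         if hand_str[i] in 'SHDC':
--             current_suit = hand_str[i]
--             i += 1
--         else:
--             if current_suit:
--                 if i + 1 < len(hand_str) and hand_str[i:i+2] == '10':
--                     suits[current_suit].append('T')
--                     i += 2
--                 else:
--                     suits[current_suit].append(hand_str[i])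
--                     i += 1
--             else:
--                 i += 1
--
--     return suits
-- ===== SOURCE B (Python) =====
-- def parse_hand_string(hand_str):
--     """SUI:RK format hand stringini parse et"""
--     suits = {'S': [], 'H': [], 'D': [], 'C': []}
--     current_suit = None
--     for ch in hand_str.replace('10', 'T'):
--         if ch in 'SHDC':
--             current_suit = ch
--         elif current_suit:
--             suits[current_suit].append(ch)
--     return suits
-- ===== Notes on version B (the rewrite author's own statement) =====
-- stated objective: simpler
-- what changed: Replaces the index-arithmetic while-loop with two-character lookahead by a single str.replace normalization of the two-character rank encoding followed by an index-free per-character loop.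
import Mathlib
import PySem

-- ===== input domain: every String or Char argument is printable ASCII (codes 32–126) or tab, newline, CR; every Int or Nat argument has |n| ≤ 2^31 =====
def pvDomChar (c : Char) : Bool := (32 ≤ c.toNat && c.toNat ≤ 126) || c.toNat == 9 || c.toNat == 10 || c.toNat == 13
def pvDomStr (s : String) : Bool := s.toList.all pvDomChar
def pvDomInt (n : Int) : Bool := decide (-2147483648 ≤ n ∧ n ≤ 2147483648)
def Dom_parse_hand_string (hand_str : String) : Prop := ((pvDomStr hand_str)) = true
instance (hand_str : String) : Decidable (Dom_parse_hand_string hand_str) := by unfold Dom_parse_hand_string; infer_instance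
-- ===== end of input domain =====

-- B replaces A's indexed while-loop with '10' lookahead by a replace('10','T') normalization
-- pass followed by a flat per-character fold (objective: simpler).

-- ===== PORT A =====
-- the while loop of A as recursion over the remaining characters; membership of the single
-- character hand_str[i] in 'SHDC' is exactly membership in the char list ['S','H','D','C']
def pvLoopA : List Char → PySem.Dict String (List String) → Option String → PySem.Dict String (List String)
  | [], suits, _ => suits
  | c :: t, suits, current_suit =>
    if c ∈ ['S', 'H', 'D', 'C'] then
      pvLoopA t suits (some (String.ofList [c]))
    else
      match current_suit with
      | some s =>
        -- 'i + 1 < len ∧ hand_str[i:i+2] == "10"' is: this char is '1' and the next is '0'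
        if c = '1' ∧ t.head? = some '0' then
          pvLoopA t.tail (suits.modify s [] (· ++ ["T"])) current_suit
        else
          pvLoopA t (suits.modify s [] (· ++ [String.ofList [c]])) current_suit
      | none => pvLoopA t suits none
termination_by cs => cs.length
decreasing_by all_goals (simp [List.length_tail]; try omega)

def parse_hand_string (hand_str : String) : List (String × List String) :=
  (pvLoopA hand_str.toList (PySem.Dict.ofList [("S", []), ("H", []), ("D", []), ("C", [])]) none).items

-- ===== PORT B =====
def pvStepB (st : PySem.Dict String (List String) × Option String) (ch : Char) :
    PySem.Dict String (List String) × Option String :=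
  if ch ∈ ['S', 'H', 'D', 'C'] then
    (st.1, some (String.ofList [ch]))
  else
    match st.2 with
    | some s => (st.1.modify s [] (· ++ [String.ofList [ch]]), st.2)
    | none => st

def parse_hand_string_alt (hand_str : String) : List (String × List String) :=
  ((PySem.Str.replace hand_str "10" "T").toList.foldl pvStepB
    (PySem.Dict.ofList [("S", []), ("H", []), ("D", []), ("C", [])], none)).1.items

-- ===== PRECONDITION & SPEC =====
def Spec_parse_hand_string (hand_str : String) (out : List (String × List String)) : Prop := out = parse_hand_string_alt hand_str
instance (hand_str : String) (out : List (String × List String)) : Decidable (Spec_parse_hand_string hand_str out) := by unfold Spec_parse_hand_string; infer_instance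

-- ===== CLAIM (what is proved, stated in full; the proofs are below) =====
def Claim_equal_parse_hand_string : Prop := ∀ (hand_str : String), Dom_parse_hand_string hand_str → Spec_parse_hand_string hand_str (parse_hand_string hand_str)

-- ===== LEMMAS AND PROOFS =====

-- specification of replace('10','T') on the character list
def pvNormTen : List Char → List Char
  | [] => []
  | c :: t =>
    if c = '1' ∧ t.head? = some '0' then 'T' :: pvNormTen t.tail else c :: pvNormTen t
termination_by cs => cs.length
decreasing_by all_goals (simp [List.length_tail]; try omega)


lemma pvStepB_none {d : PySem.Dict String (List String)} {c : Char}
    (h : c ∉ ['S', 'H', 'D', 'C']) : pvStepB (d, none) c = (d, none) := by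
  simp [pvStepB, h]

lemma pvNormTen_cons_of_not {c : Char} {t : List Char}
    (h : ¬(c = '1' ∧ t.head? = some '0')) : pvNormTen (c :: t) = c :: pvNormTen t := by
  rw [pvNormTen]; simp [h]

lemma pvIsPrefix_ten (c : Char) (t : List Char) :
    List.isPrefixOf ['1', '0'] (c :: t) = decide (c = '1' ∧ t.head? = some '0') := by
  cases t with
  | nil => simp [List.isPrefixOf]
  | cons c2 t2 =>
    have h1' : (('1' : Char) = c) = (c = '1') := propext eq_comm
    have h2' : (('0' : Char) = c2) = (c2 = '0') := propext eq_comm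
    by_cases h1 : c = '1' <;> by_cases h2 : c2 = '0' <;>
      simp [List.isPrefixOf, List.head?, h1, h2, h1', h2']

lemma pvReplace_go_eq : ∀ fuel l acc, l.length ≤ fuel →
    PySem.Chars.replace.go ['1', '0'] ['T'] fuel l acc = acc.reverse ++ pvNormTen l := by
  intro fuel
  induction fuel with
  | zero =>
    intro l acc hl
    have : l = [] := List.eq_nil_of_length_eq_zero (Nat.le_zero.mp hl)
    subst this
    rw [PySem.Chars.replace.go, pvNormTen]
  | succ n ih =>
    intro l acc hl
    cases l with
    | nil => rw [PySem.Chars.replace.go, pvNormTen] <;> simp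
    | cons c t =>
      rw [PySem.Chars.replace.go]
      rw [pvIsPrefix_ten]
      by_cases h : c = '1' ∧ t.head? = some '0'
      · rw [if_pos (by simp [h])]
        obtain ⟨hc, ht⟩ := h
        cases t with
        | nil => simp at ht
        | cons c2 t2 =>
          simp only [List.head?] at ht
          injection ht with ht2
          subst hc; subst ht2
          have hdrop : List.drop (['1', '0'] : List Char).length ('1' :: '0' :: t2) = t2 := by simp
          rw [hdrop, ih t2 (['T'].reverse ++ acc) (by simp at hl ⊢; omega)]
          rw [pvNormTen]
          simp
      · rw [if_neg (by simp [h])]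
        rw [ih t (c :: acc) (by simp at hl ⊢; omega)]
        rw [pvNormTen_cons_of_not h]
        simp

lemma pvReplace_eq (l : List Char) : PySem.Chars.replace l ['1', '0'] ['T'] = pvNormTen l := by
  rw [PySem.Chars.replace]
  simp only [List.isEmpty]
  exact (pvReplace_go_eq l.length l [] le_rfl).trans (by simp)

lemma pvLoop_eq : ∀ l d cur, pvLoopA l d cur = ((pvNormTen l).foldl pvStepB (d, cur)).1 := by
  intro l d cur
  induction l, d, cur using pvLoopA.induct with
  | case1 suits cur => rw [pvLoopA, pvNormTen]; rfl
  | case2 c t suits cur h ih =>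
    have hc : ¬(c = '1' ∧ t.head? = some '0') := by
      rintro ⟨rfl, -⟩; simp at h
    rw [pvNormTen_cons_of_not hc, pvLoopA.eq_def]
    simpa [pvStepB, h] using ih
  | case3 c t suits h1 s h ih =>
    obtain ⟨rfl, ht⟩ := h
    have hnorm : pvNormTen ('1' :: t) = 'T' :: pvNormTen t.tail := by
      rw [pvNormTen]; simp [ht]
    have hT : pvStepB (suits, some s) 'T' = (suits.modify s [] (· ++ ["T"]), some s) := by
      simp [pvStepB]
    rw [pvLoopA.eq_def, hnorm]
    simp only [List.foldl, hT]
    simpa [h1, ht] using ih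
  | case4 c t suits h1 s h ih =>
    have hc : pvStepB (suits, some s) c = (suits.modify s [] (· ++ [String.ofList [c]]), some s) := by
      simp [pvStepB, h1]
    rw [pvNormTen_cons_of_not h, pvLoopA.eq_def]
    simp only [List.foldl, hc]
    simpa [h1, h] using ih
  | case5 c t suits h ih =>
    rw [pvLoopA.eq_def]
    simp only [h, if_false]
    rw [ih]
    by_cases hc : c = '1' ∧ t.head? = some '0'
    · obtain ⟨rfl, ht⟩ := hc
      cases t with
      | nil => simp at ht
      | cons c2 t2 =>
        simp only [List.head?] at ht
        injection ht with ht2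
        subst ht2
        have h0 : ¬(('0' : Char) = '1' ∧ t2.head? = some '0') := by simp
        rw [pvNormTen_cons_of_not h0]
        rw [show pvNormTen ('1' :: '0' :: t2) = 'T' :: pvNormTen t2 by
          rw [pvNormTen]; simp [List.head?, List.tail]]
        simp only [List.foldl]
        rw [pvStepB_none (by decide), pvStepB_none (by decide)]
    · rw [pvNormTen_cons_of_not hc]
      simp only [List.foldl]
      rw [pvStepB_none h]

-- ===== VERDICT (by name: the statement is the Claim_ definition above) =====
theorem parse_hand_string_spec : Claim_equal_parse_hand_string := by
  intro s _
  unfold Spec_parse_hand_string parse_hand_string parse_hand_string_alt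
  rw [pvLoop_eq]
  simp [PySem.Str.toList_replace, pvReplace_eq]
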